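-- pv_equiv track=rewrite | github.com/kotokkk/Homework | lesson8/6.py | yes_or_no
-- ===== SOURCE A (Python) =====
-- def yes_or_no(numbers):
--     if not all(isinstance(num, int) for num in numbers):
--         return False
--
--     seen = set()
--     result = []
--
--     for num in numbers:
--         if num in seen:
--             result.append("Yes")
--         else:
--             result.append("No")
--             seen.add(num)
--
--     return result
-- ===== SOURCE B (Python) =====
-- def yes_or_no(numbers):
--     if not all(isinstance(num, int) for num in numbers):
--         return False
--     first = {}
--     for i, num in enumerate(numbers):
--         first.setdefault(num, i)
--     return ["No" if first[num] == i else "Yes" for i, num in enumerate(numbers)]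
-- ===== Notes on version B (the rewrite author's own statement) =====
-- stated objective: alternative
-- what changed: Replaces the interleaved membership-test-and-add loop by two separate passes: one pass builds a first-occurrence index table with setdefault, a second pass classifies each position as 'No' exactly when it is its value's first occurrence.
import Mathlib
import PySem

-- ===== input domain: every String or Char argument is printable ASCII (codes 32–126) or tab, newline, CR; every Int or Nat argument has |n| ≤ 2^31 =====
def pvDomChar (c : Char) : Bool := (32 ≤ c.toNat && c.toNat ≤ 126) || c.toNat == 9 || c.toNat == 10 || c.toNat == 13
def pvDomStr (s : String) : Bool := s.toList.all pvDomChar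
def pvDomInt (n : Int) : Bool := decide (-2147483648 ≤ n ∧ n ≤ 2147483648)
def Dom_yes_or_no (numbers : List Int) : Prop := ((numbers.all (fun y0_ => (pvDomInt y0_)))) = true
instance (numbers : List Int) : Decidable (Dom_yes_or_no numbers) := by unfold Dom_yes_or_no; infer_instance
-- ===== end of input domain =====

-- B restructures A's single interleaved seen-set loop into two passes (first-occurrence index table, then classify); same return value, no speed claim.
-- The `isinstance(num, int)` guard of A is always satisfied under the List Int typing, so the `return False` branch is unreachable and not ported.

-- ===== PORT A =====
def yes_or_no (numbers : List Int) : List String :=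
  (numbers.foldl
    (fun (st : PySem.Set Int × List String) num =>
      if PySem.Set.contains st.1 num then (st.1, st.2 ++ ["Yes"])
      else (PySem.Set.add st.1 num, st.2 ++ ["No"]))
    (PySem.Set.empty, [])).2

-- ===== PORT B =====
def yes_or_no_alt (numbers : List Int) : List String :=
  let first := (PySem.List.enumerate numbers).foldl
    (fun (d : PySem.Dict Int Int) p => d.setdefault p.2 p.1) PySem.Dict.empty
  (PySem.List.enumerate numbers).map
    (fun p => if first.getD p.2 0 == p.1 then "No" else "Yes")

-- ===== PRECONDITION & SPEC =====
def Spec_yes_or_no (numbers : List Int) (out : List String) : Prop := out = yes_or_no_alt numbers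
instance (numbers : List Int) (out : List String) : Decidable (Spec_yes_or_no numbers out) := by unfold Spec_yes_or_no; infer_instance

-- ===== CLAIM (what is proved, stated in full; the proofs are below) =====
def Claim_equal_yes_or_no : Prop := ∀ (numbers : List Int), Dom_yes_or_no numbers → Spec_yes_or_no numbers (yes_or_no numbers)

-- ===== LEMMAS AND PROOFS =====

-- Common reference: position-by-position marking with the processed prefix as state.
def pvMark (pre l : List Int) : List String :=
  match l with
  | [] => []
  | n :: t => (if n ∈ pre then "Yes" else "No") :: pvMark (pre ++ [n]) t

lemma aLoop (l : List Int) : ∀ (pre : List Int) (s : PySem.Set Int) (acc : List String),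
    (∀ x, PySem.Set.contains s x = decide (x ∈ pre)) →
    (l.foldl
      (fun (st : PySem.Set Int × List String) num =>
        if PySem.Set.contains st.1 num then (st.1, st.2 ++ ["Yes"])
        else (PySem.Set.add st.1 num, st.2 ++ ["No"]))
      (s, acc)).2 = acc ++ pvMark pre l := by
  induction l with
  | nil => intro pre s acc _; simp [pvMark]
  | cons n t ih =>
    intro pre s acc hs
    by_cases hn : n ∈ pre
    · rw [List.foldl_cons]
      simp only [hs n, hn, decide_true, if_true]
      rw [ih (pre ++ [n]) s (acc ++ ["Yes"]) ?_]
      · simp [pvMark, hn]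
      · intro x
        rw [hs x]
        by_cases hx : x = n
        · simp [hx, hn]
        · simp [List.mem_append, hx]
    · rw [List.foldl_cons]
      simp only [hs n, hn, decide_false, Bool.false_eq_true, if_false]
      rw [ih (pre ++ [n]) (PySem.Set.add s n) (acc ++ ["No"]) ?_]
      · simp [pvMark, hn]
      · intro x
        have hmem : x ∈ s ↔ x ∈ pre := by
          have h := hs x
          simp [PySem.Set.contains] at h
          exact h
        simp [PySem.Set.contains, PySem.Set.mem_add, hmem]

lemma firstD_get? (l : List Int) : ∀ (s : Int) (d : PySem.Dict Int Int) (x : Int),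
    ((PySem.List.enumerate l s).foldl
      (fun (d : PySem.Dict Int Int) p => d.setdefault p.2 p.1) d).get? x
    = (d.get? x).or (if x ∈ l then some (s + (l.idxOf x : Int)) else none) := by
  induction l with
  | nil => intro s d x; simp [PySem.List.enumerate_nil]
  | cons n t ih =>
    intro s d x
    rw [PySem.List.enumerate_cons, List.foldl_cons, ih]
    by_cases hx : x = n
    · subst hx
      cases hd : d.get? x with
      | some v =>
        have : d.setdefault x s = d :=
          PySem.Dict.setdefault_of_contains _ _ (by simp [PySem.Dict.contains_eq_isSome_get?, hd])
        simp [this, hd]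
      | none =>
        have : d.setdefault x s = d.insert x s :=
          PySem.Dict.setdefault_of_not_contains _ _ (by simp [PySem.Dict.contains_eq_isSome_get?, hd])
        simp [this, PySem.Dict.get?_insert_self, List.idxOf_cons_self]
    · have hget : (d.setdefault n s).get? x = d.get? x := by
        by_cases hc : d.contains n
        · rw [PySem.Dict.setdefault_of_contains _ _ hc]
        · rw [PySem.Dict.setdefault_of_not_contains _ _ (by simpa using hc),
              PySem.Dict.get?_insert_of_ne _ _ hx]
      rw [hget]
      have hmem : (x ∈ n :: t) = (x ∈ t) := by simp [hx]
      have hidx : x ∈ t → ((n :: t).idxOf x : Int) = (t.idxOf x : Int) + 1 := by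
        intro _
        rw [List.idxOf_cons_ne _ (by exact fun h => hx h.symm)]
        push_cast; omega
      by_cases hm : x ∈ t
      · simp only [hmem, hm, if_true, hidx hm]
        have harith : s + ((t.idxOf x : Int) + 1) = s + 1 + (t.idxOf x : Int) := by ring
        rw [harith]
      · simp [hmem, hm]

lemma bMap (l : List Int) : ∀ (pre : List Int) (first : PySem.Dict Int Int),
    (∀ x, first.get? x = if x ∈ pre ++ l then some (((pre ++ l).idxOf x : Int)) else none) →
    (PySem.List.enumerate l (pre.length : Int)).map
      (fun p => if first.getD p.2 0 == p.1 then "No" else "Yes") = pvMark pre l := by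
  induction l with
  | nil => intro pre first _; simp [PySem.List.enumerate_nil, pvMark]
  | cons n t ih =>
    intro pre first hf
    rw [PySem.List.enumerate_cons, List.map_cons]
    have hnmem : n ∈ pre ++ n :: t := by simp
    have hgetn : first.getD n 0 = ((pre ++ n :: t).idxOf n : Int) := by
      simp [PySem.Dict.getD_eq_get?_getD, hf n, hnmem]
    have htail : (PySem.List.enumerate t ((pre.length : Int) + 1)).map
        (fun p => if first.getD p.2 0 == p.1 then "No" else "Yes") = pvMark (pre ++ [n]) t := by
      have := ih (pre ++ [n]) first ?_
      · simpa using this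
      · intro x
        rw [hf x]
        simp [List.append_assoc]
    by_cases hn : n ∈ pre
    · have hidx : (pre ++ n :: t).idxOf n = pre.idxOf n := List.idxOf_append_of_mem hn
      have hlt : pre.idxOf n < pre.length := List.idxOf_lt_length_of_mem hn
      have hne : first.getD n 0 ≠ (pre.length : Int) := by
        rw [hgetn, hidx]; exact_mod_cast Nat.ne_of_lt hlt
      simp only [pvMark, hn, if_true, htail]
      simp [hne]
    · have hidx : (pre ++ n :: t).idxOf n = pre.length := by
        rw [List.idxOf_append_of_notMem hn, List.idxOf_cons_self]
        simp
      have heq : first.getD n 0 = (pre.length : Int) := by rw [hgetn, hidx]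
      simp only [pvMark, hn, if_false, htail]
      simp [heq]

lemma mark_eq (numbers : List Int) : yes_or_no numbers = pvMark [] numbers := by
  unfold yes_or_no
  rw [aLoop numbers [] PySem.Set.empty [] (by intro x; simp [PySem.Set.empty, PySem.Set.contains])]
  simp

lemma alt_eq (numbers : List Int) : yes_or_no_alt numbers = pvMark [] numbers := by
  unfold yes_or_no_alt
  rw [show (PySem.List.enumerate numbers) = PySem.List.enumerate numbers (([] : List Int).length : Int) by simp]
  apply bMap
  intro x
  rw [show ((([] : List Int)).length : Int) = 0 from rfl]
  rw [firstD_get? numbers 0 PySem.Dict.empty x]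
  simp

-- ===== VERDICT (by name: the statement is the Claim_ definition above) =====
theorem yes_or_no_spec : Claim_equal_yes_or_no := by
  intro numbers _
  unfold Spec_yes_or_no
  rw [mark_eq, alt_eq]
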